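-- pv_equiv track=rewrite | github.com/avisinha1711-bi/Upcoming | BioOS.py | find_restriction_sites
-- ===== SOURCE A (Python) =====
-- from typing import Dict, List, Optional, Tuple
--
-- def find_restriction_sites(sequence: str) -> Dict:
--     """Find restriction enzyme sites"""
--     restriction_enzymes = {
--         'EcoRI': 'GAATTC',
--         'BamHI': 'GGATCC',
--         'HindIII': 'AAGCTT',
--         'NotI': 'GCGGCCGC',
--         'XbaI': 'TCTAGA',
--         'SpeI': 'ACTAGT'
--     }
--
--     sites = {}
--     for enzyme, site in restriction_enzymes.items():
--         positions = []
--         for i in range(len(sequence) - len(site) + 1):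
--             if sequence[i:i+len(site)] == site:
--                 positions.append(i)
--         if positions:
--             sites[enzyme] = positions
--
--     return sites
-- ===== SOURCE B (Python) =====
-- def find_restriction_sites(sequence: str) -> dict:
--     """Find restriction enzyme sites"""
--     restriction_enzymes = {
--         'EcoRI': 'GAATTC',
--         'BamHI': 'GGATCC',
--         'HindIII': 'AAGCTT',
--         'NotI': 'GCGGCCGC',
--         'XbaI': 'TCTAGA',
--         'SpeI': 'ACTAGT'
--     }
--
--     # Build a k-mer -> positions index of the sequence once per distinct
--     # site length, then answer every enzyme by a single dictionary lookup.
--     index = {}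
--     for k in sorted({len(site) for site in restriction_enzymes.values()}):
--         for i in range(len(sequence) - k + 1):
--             index.setdefault(sequence[i:i+k], []).append(i)
--
--     sites = {}
--     for enzyme, site in restriction_enzymes.items():
--         positions = index.get(site, [])
--         if positions:
--             sites[enzyme] = positions
--     return sites
-- ===== Notes on version B (the rewrite author's own statement) =====
-- stated objective: alternative
-- what changed: Replaces A's per-enzyme scan that slices and compares the sequence at every index with an inverted algorithm: one pass per distinct site length builds a k-mer -> positions dictionary index of the sequence, and each enzyme is then answered by a single hash lookup, so no per-enzyme scan over the sequence remains.
import Mathlib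
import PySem

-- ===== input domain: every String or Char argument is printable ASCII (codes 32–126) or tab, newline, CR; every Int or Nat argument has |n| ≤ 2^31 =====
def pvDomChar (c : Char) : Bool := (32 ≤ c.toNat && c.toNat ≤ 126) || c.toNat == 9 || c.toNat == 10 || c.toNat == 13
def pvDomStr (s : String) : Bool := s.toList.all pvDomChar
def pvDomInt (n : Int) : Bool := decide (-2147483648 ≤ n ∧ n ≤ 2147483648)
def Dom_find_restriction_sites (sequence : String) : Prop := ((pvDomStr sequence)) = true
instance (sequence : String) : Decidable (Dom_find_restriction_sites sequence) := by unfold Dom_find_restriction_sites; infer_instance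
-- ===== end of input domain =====

-- B inverts the traversal: instead of scanning every index once per enzyme, it builds a
-- k-mer -> positions dictionary index of the sequence once per distinct site length and
-- answers each enzyme by a single lookup; objective: alternative (hash-index algorithm).

-- the fixed enzyme table both Pythons carry verbatim
def pvEnzymes : List (String × String) :=
  [("EcoRI", "GAATTC"), ("BamHI", "GGATCC"), ("HindIII", "AAGCTT"),
   ("NotI", "GCGGCCGC"), ("XbaI", "TCTAGA"), ("SpeI", "ACTAGT")]

-- ===== PORT A =====
-- A's inner loop: for i in range(len(sequence) - len(site) + 1): if sequence[i:i+len(site)] == site: positions.append(i)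
def pvScanA (s site : List Char) : List Int :=
  (PySem.List.pyRange 0 ((s.length : Int) - (site.length : Int) + 1)).foldl
    (fun positions i =>
      if PySem.Chars.slice s (some i) (some (i + (site.length : Int))) = site
      then positions ++ [i] else positions) []

def find_restriction_sites (sequence : String) : List (String × List Int) :=
  pvEnzymes.foldl (fun sites es =>
    let positions := pvScanA sequence.toList es.2.toList
    if positions ≠ [] then sites ++ [(es.1, positions)] else sites) []

-- ===== PORT B =====
-- sorted({len(site) for site in restriction_enzymes.values()})
def pvSiteLengths : List Int :=
  PySem.List.sorted (PySem.Set.ofList (pvEnzymes.map (fun es => (es.2.toList.length : Int)))) (fun x => x) false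

-- index.setdefault(sequence[i:i+k], []).append(i), for each k then each i
def pvKmerIndex (s : List Char) : PySem.Dict (List Char) (List Int) :=
  pvSiteLengths.foldl (fun d k =>
    (PySem.List.pyRange 0 ((s.length : Int) - k + 1)).foldl
      (fun d i => d.modify (PySem.Chars.slice s (some i) (some (i + k))) [] (· ++ [i])) d)
    PySem.Dict.empty

def find_restriction_sites_alt (sequence : String) : List (String × List Int) :=
  let index := pvKmerIndex sequence.toList
  pvEnzymes.foldl (fun sites es =>
    let positions := index.getD es.2.toList []
    if positions ≠ [] then sites ++ [(es.1, positions)] else sites) []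

-- ===== PRECONDITION & SPEC =====
def Spec_find_restriction_sites (sequence : String) (out : List (String × List Int)) : Prop := out = find_restriction_sites_alt sequence
instance (sequence : String) (out : List (String × List Int)) : Decidable (Spec_find_restriction_sites sequence out) := by unfold Spec_find_restriction_sites; infer_instance

-- ===== CLAIM =====
def Claim_equal_find_restriction_sites : Prop := ∀ (sequence : String), Dom_find_restriction_sites sequence → Spec_find_restriction_sites sequence (find_restriction_sites sequence)

-- ===== LEMMAS AND PROOFS =====

-- A's scan as a filter over the index range (k = site length, as a Nat-range)
lemma pvScanA_eq_filter (s site : List Char) :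
    pvScanA s site
      = if site.length ≤ s.length then
          ((List.range (s.length - site.length + 1)).filter
            (fun (j : Nat) => decide (PySem.Chars.slice s (some (j : Int)) (some ((j : Int) + (site.length : Int))) = site))).map
            (fun j : Nat => (j : Int))
        else [] := by
  unfold pvScanA
  rw [PySem.List.foldl_append_ite_eq_filter]
  simp only [List.nil_append]
  by_cases h : site.length ≤ s.length
  · rw [if_pos h]
    have hT : (s.length : Int) - (site.length : Int) + 1 = ((s.length - site.length + 1 : Nat) : Int) := by omega
    rw [hT, PySem.List.pyRange_zero_natCast, List.filter_map]
    rfl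
  · rw [if_neg h, PySem.List.pyRange_one_eq_nil (show (s.length : Int) - (site.length : Int) + 1 ≤ 0 by omega)]
    rfl

-- one indexing pass over k-mers: the lookup of `site` gains exactly A's scan when
-- len(site) = k, and nothing otherwise (every key written has length k)
lemma pvPass_getD (s site : List Char) (k : Nat) (hk : 0 < k)
    (d : PySem.Dict (List Char) (List Int)) :
    ((PySem.List.pyRange 0 ((s.length : Int) - (k : Int) + 1)).foldl
        (fun d i => d.modify (PySem.Chars.slice s (some i) (some (i + (k : Int)))) [] (· ++ [i])) d).getD site []
      = d.getD site [] ++ (if site.length = k then pvScanA s site else []) := by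
  rw [pvScanA_eq_filter]
  by_cases h : k ≤ s.length
  · have hT : (s.length : Int) - (k : Int) + 1 = ((s.length - k + 1 : Nat) : Int) := by omega
    rw [hT, PySem.List.pyRange_zero_natCast, List.foldl_map]
    have hpair : ∀ (d : PySem.Dict (List Char) (List Int)),
        (List.range (s.length - k + 1)).foldl
          (fun d (j : Nat) => d.modify (PySem.Chars.slice s (some (j : Int)) (some ((j : Int) + (k : Int)))) [] (· ++ [(j : Int)])) d
        = ((List.range (s.length - k + 1)).map
            (fun j : Nat => (PySem.Chars.slice s (some (j : Int)) (some ((j : Int) + (k : Int))), (j : Int)))).foldl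
            (fun d p => d.modify p.1 [] (· ++ [p.2])) d := by
      intro d; rw [List.foldl_map]
    rw [hpair, PySem.Dict.getD_foldl_modify_append, List.filter_map, List.map_map]
    congr 1
    by_cases hlen : site.length = k
    · rw [if_pos hlen, if_pos (by omega)]
      subst hlen
      refine (congrArg _ (List.filter_congr (fun j _ => ?_))).trans rfl
      simp [Function.comp, Bool.beq_eq_decide_eq]
    · rw [if_neg hlen]
      have : List.filter ((fun p : List Char × Int => p.1 == site) ∘
          (fun j : Nat => (PySem.Chars.slice s (some (j : Int)) (some ((j : Int) + (k : Int))), (j : Int))))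
          (List.range (s.length - k + 1)) = [] := by
        rw [List.filter_eq_nil_iff]
        intro j hj
        simp only [List.mem_range] at hj
        simp only [Function.comp, beq_iff_eq]
        intro heq
        have hlenEq : (PySem.Chars.slice s (some (j : Int)) (some ((j : Int) + (k : Int)))).length = site.length := by
          rw [heq]
        rw [PySem.Chars.slice_eq_listSlice, PySem.List.slice_natCast_add, List.length_take, List.length_drop] at hlenEq
        omega
      rw [this]
      rfl
  · rw [PySem.List.pyRange_one_eq_nil (show (s.length : Int) - (k : Int) + 1 ≤ 0 by omega),
      List.foldl_nil]
    by_cases hlen : site.length = k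
    · rw [if_pos hlen, if_neg (by omega)]
      simp
    · rw [if_neg hlen]
      simp

-- the index lookup equals A's scan for any site of one of the indexed lengths
lemma pvIndex_getD (s site : List Char) (hlen : site.length = 6 ∨ site.length = 8) :
    (pvKmerIndex s).getD site [] = pvScanA s site := by
  have hL : pvSiteLengths = [(6 : Int), 8] := by decide
  unfold pvKmerIndex
  rw [hL]
  simp only [List.foldl_cons, List.foldl_nil]
  rw [show ((6 : Int)) = ((6 : Nat) : Int) from rfl] at *
  rw [show ((8 : Int)) = ((8 : Nat) : Int) from rfl]
  rw [pvPass_getD s site 8 (by omega), pvPass_getD s site 6 (by omega)]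
  rcases hlen with h | h
  · rw [if_pos h, if_neg (by omega)]
    simp
  · rw [if_neg (by omega), if_pos h]
    simp

-- ===== VERDICT =====
theorem find_restriction_sites_spec : Claim_equal_find_restriction_sites := by
  intro sequence _
  unfold Spec_find_restriction_sites find_restriction_sites find_restriction_sites_alt pvEnzymes
  simp only [List.foldl_cons, List.foldl_nil]
  rw [pvIndex_getD sequence.toList ("GAATTC" : String).toList (by decide),
    pvIndex_getD sequence.toList ("GGATCC" : String).toList (by decide),
    pvIndex_getD sequence.toList ("AAGCTT" : String).toList (by decide),
    pvIndex_getD sequence.toList ("GCGGCCGC" : String).toList (by decide),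
    pvIndex_getD sequence.toList ("TCTAGA" : String).toList (by decide),
    pvIndex_getD sequence.toList ("ACTAGT" : String).toList (by decide)]
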